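-- pv_equiv track=rewrite | github.com/Sharvay/Job-tracker-agent | utils/content_cleaner.py | clean_linkedin_content
-- ===== SOURCE A (Python) =====
-- def clean_linkedin_content(content: str) -> str:
--     """
--     Clean LinkedIn-specific content
--     """
--     # Find the cutoff point
--     cutoff_phrases = [
--         "Sign in to create job alert",
--         "Create job alert",
--         "Similar jobs",
--         "People also viewed",
--         "Show more jobs like this"
--     ]
--
--     # Find the earliest occurrence of any cutoff phrase
--     earliest_index = len(content)
--     found_phrase = None
--
--     for phrase in cutoff_phrases:
--         index = content.find(phrase)
--         if index != -1 and index < earliest_index: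
--             earliest_index = index
--             found_phrase = phrase
--
--     # Cut content if we found a cutoff phrase
--     if found_phrase:
--         content = content[:earliest_index]
--
--     return content.strip()
-- ===== SOURCE B (Python) =====
-- def clean_linkedin_content(content: str) -> str:
--     """
--     Clean LinkedIn-specific content
--     """
--     cutoff_phrases = [
--         "Sign in to create job alert",
--         "Create job alert",
--         "Similar jobs",
--         "People also viewed",
--         "Show more jobs like this"
--     ]
--
--     # Single left-to-right scan: stop at the first position where any
--     # cutoff phrase starts; that is the earliest occurrence overall.
--     for i in range(len(content)):
--         if any(content.startswith(phrase, i) for phrase in cutoff_phrases):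
--             return content[:i].strip()
--     return content.strip()
-- ===== Notes on version B (the rewrite author's own statement) =====
-- stated objective: alternative
-- what changed: B replaces the per-phrase content.find() scans plus index minimisation by a single left-to-right scan that stops at the first position where any cutoff phrase starts.
import Mathlib
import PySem

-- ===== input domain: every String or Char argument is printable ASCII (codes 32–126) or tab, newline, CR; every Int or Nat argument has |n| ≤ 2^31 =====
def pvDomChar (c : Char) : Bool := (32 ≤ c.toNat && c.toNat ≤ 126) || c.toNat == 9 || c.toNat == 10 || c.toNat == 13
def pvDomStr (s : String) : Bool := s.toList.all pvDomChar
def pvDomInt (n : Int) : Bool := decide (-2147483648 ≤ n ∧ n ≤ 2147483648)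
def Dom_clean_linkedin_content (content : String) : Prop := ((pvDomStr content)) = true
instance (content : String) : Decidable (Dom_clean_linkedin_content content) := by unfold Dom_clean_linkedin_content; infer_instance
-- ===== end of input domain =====

-- B replaces A's per-phrase find() scans + index minimisation by one left-to-right scan
-- stopping at the first position where any cutoff phrase starts (objective: alternative).

-- ===== PORT A =====
def pvCutoffPhrases : List String :=
  ["Sign in to create job alert", "Create job alert", "Similar jobs",
   "People also viewed", "Show more jobs like this"]

def pvAStep (content : String) (st : Int × Option String) (phrase : String) : Int × Option String :=
  let index := PySem.Str.find content phrase
  if index ≠ -1 ∧ index < st.1 then (index, some phrase) else st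

-- every stored phrase is a nonempty literal, so Python's truthiness test
-- 'if found_phrase:' is exactly the some/none match below
def clean_linkedin_content (content : String) : String :=
  let st := pvCutoffPhrases.foldl (pvAStep content) (PySem.Str.len content, none)
  match st.2 with
  | some _ => PySem.Str.strip (PySem.Str.slice content none (some st.1))
  | none => PySem.Str.strip content

-- ===== PORT B =====
def pvPhrasesL : List (List Char) := pvCutoffPhrases.map String.toList

-- the 'for i in range(len(content))' loop of Source B: walking down the suffix c :: t IS index i;
-- content.startswith(phrase, i) is phrase.isPrefixOf (suffix at i)
def pvCutGo : List Char → Nat → Option Nat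
  | [], _ => none
  | c :: t, i =>
    if pvPhrasesL.any (fun p => List.isPrefixOf p (c :: t)) then some i else pvCutGo t (i + 1)

def clean_linkedin_content_alt (content : String) : String :=
  match pvCutGo content.toList 0 with
  | some i => PySem.Str.strip (String.ofList (content.toList.take i))
  | none => PySem.Str.strip content

-- ===== PRECONDITION & SPEC =====
def Spec_clean_linkedin_content (content : String) (out : String) : Prop := out = clean_linkedin_content_alt content
instance (content : String) (out : String) : Decidable (Spec_clean_linkedin_content content out) := by unfold Spec_clean_linkedin_content; infer_instance

-- ===== CLAIM (what is proved, stated in full; the proofs are below) =====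
def Claim_equal_clean_linkedin_content : Prop := ∀ (content : String), Dom_clean_linkedin_content content → Spec_clean_linkedin_content content (clean_linkedin_content content)

-- ===== LEMMAS AND PROOFS =====

theorem pvPhrasesL_ne_nil : ∀ p ∈ pvPhrasesL, p ≠ [] := by decide

-- the Int component of A's fold, as a standalone fold
def pvEFold (content : String) (ps : List String) (e : Int) : Int :=
  ps.foldl (fun a p =>
    if PySem.Str.find content p ≠ -1 ∧ PySem.Str.find content p < a then PySem.Str.find content p else a) e

theorem pvEFold_le (content : String) (ps : List String) (e : Int) :
    pvEFold content ps e ≤ e := by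
  induction ps generalizing e with
  | nil => simp [pvEFold]
  | cons p ps ih =>
    simp only [pvEFold, List.foldl_cons]
    split_ifs with h
    · exact le_trans (ih _) (le_of_lt h.2)
    · exact ih e

theorem pvFold_fst (content : String) (ps : List String) (e : Int) (f : Option String) :
    (ps.foldl (pvAStep content) (e, f)).1 = pvEFold content ps e := by
  induction ps generalizing e f with
  | nil => simp [pvEFold]
  | cons p ps ih =>
    simp only [List.foldl_cons, pvAStep, pvEFold]
    split_ifs with h
    · exact ih _ _
    · exact ih _ _

theorem pvFold_snd (content : String) (ps : List String) (e : Int) (f : Option String) :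
    (ps.foldl (pvAStep content) (e, f)).2 = none ↔ f = none ∧ pvEFold content ps e = e := by
  induction ps generalizing e f with
  | nil => simp [pvEFold]
  | cons p ps ih =>
    simp only [List.foldl_cons, pvAStep, pvEFold]
    split_ifs with h
    · rw [ih]
      constructor
      · rintro ⟨h1, _⟩; exact absurd h1 (by simp)
      · rintro ⟨_, h2⟩
        exact absurd (lt_of_le_of_lt (h2 ▸ pvEFold_le content ps _) h.2) (lt_irrefl _)
    · exact ih e f

theorem pvEFold_cases (content : String) (ps : List String) (e : Int) :
    pvEFold content ps e = e ∨
      ∃ p ∈ ps, pvEFold content ps e = PySem.Str.find content p ∧ PySem.Str.find content p ≠ -1 := by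
  induction ps generalizing e with
  | nil => left; simp [pvEFold]
  | cons p ps ih =>
    simp only [pvEFold, List.foldl_cons]
    split_ifs with h
    · rcases ih (PySem.Str.find content p) with h1 | ⟨q, hq, h2, h3⟩
      · right
        refine ⟨p, List.mem_cons_self .., ?_, h.1⟩
        exact h1
      · right
        refine ⟨q, List.mem_cons_of_mem _ hq, ?_, h3⟩
        exact h2
    · rcases ih e with h1 | ⟨q, hq, h2, h3⟩
      · left; exact h1
      · right
        refine ⟨q, List.mem_cons_of_mem _ hq, ?_, h3⟩
        exact h2

theorem pvEFold_min (content : String) (ps : List String) (e : Int)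
    (p : String) (hp : p ∈ ps) (hf : PySem.Str.find content p ≠ -1) :
    pvEFold content ps e ≤ PySem.Str.find content p := by
  induction ps generalizing e with
  | nil => cases hp
  | cons q ps ih =>
    simp only [pvEFold, List.foldl_cons]
    rcases List.mem_cons.mp hp with rfl | hp'
    · split_ifs with h
      · exact pvEFold_le content ps _
      · push_neg at h
        exact le_trans (pvEFold_le content ps e) (h hf)
    · split_ifs with h
      · exact ih _ hp'
      · exact ih _ hp'

theorem pvCutGo_none (t : List Char) (i : Nat) :
    pvCutGo t i = none ↔ ∀ p ∈ pvPhrasesL, ¬ p <:+: t := by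
  induction t generalizing i with
  | nil =>
    simp only [pvCutGo, true_iff]
    intro p hp h
    exact pvPhrasesL_ne_nil p hp (List.eq_nil_of_infix_nil h)
  | cons c t ih =>
    simp only [pvCutGo]
    split_ifs with h
    · refine iff_of_false (by simp) ?_
      intro hall
      rcases List.any_eq_true.mp h with ⟨p, hp, hpre⟩
      exact hall p hp (List.isPrefixOf_iff_prefix.mp hpre).isInfix
    · rw [ih]
      constructor
      · intro hall p hp hinf
        rcases List.infix_cons_iff.mp hinf with hpre | hinf'
        · exact h (List.any_eq_true.mpr ⟨p, hp, List.isPrefixOf_iff_prefix.mpr hpre⟩)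
        · exact hall p hp hinf'
      · intro hall p hp hinf
        exact hall p hp (hinf.trans (List.suffix_cons c t).isInfix)

theorem pvCutGo_some (t : List Char) (i r : Nat) (h : pvCutGo t i = some r) :
    i ≤ r ∧ (∃ p ∈ pvPhrasesL, p <+: t.drop (r - i)) ∧
      (∀ j < r - i, ∀ p ∈ pvPhrasesL, ¬ p <+: t.drop j) := by
  induction t generalizing i with
  | nil => simp [pvCutGo] at h
  | cons c t ih =>
    simp only [pvCutGo] at h
    split_ifs at h with hc
    · cases h
      refine ⟨le_refl _, ?_, by omega⟩
      rcases List.any_eq_true.mp hc with ⟨p, hp, hpre⟩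
      exact ⟨p, hp, by simpa using List.isPrefixOf_iff_prefix.mp hpre⟩
    · obtain ⟨h1, ⟨p, hp, hpre⟩, hmin⟩ := ih (i + 1) h
      refine ⟨by omega, ⟨p, hp, ?_⟩, ?_⟩
      · have hd : (c :: t).drop (r - i) = t.drop (r - (i + 1)) := by
          have : r - i = (r - (i + 1)) + 1 := by omega
          simp [this]
        exact hd ▸ hpre
      · intro j hj q hq hqp
        rcases Nat.eq_zero_or_pos j with rfl | hj0
        · exact hc (List.any_eq_true.mpr ⟨q, hq, List.isPrefixOf_iff_prefix.mpr (by simpa using hqp)⟩)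
        · refine hmin (j - 1) (by omega) q hq ?_
          have hd : (c :: t).drop j = t.drop (j - 1) := by
            have : j = (j - 1) + 1 := by omega
            rw [this]; simp
          exact hd ▸ hqp

theorem pvFind_lt_len (content : String) (p : String) (hp : p ∈ pvCutoffPhrases)
    (hf : PySem.Str.find content p ≠ -1) :
    PySem.Str.find content p < (content.toList.length : Int) := by
  rw [PySem.Str.find_eq] at hf ⊢
  have h0 : 0 ≤ PySem.Chars.find content.toList p.toList :=
    (PySem.Chars.find_nonneg_iff content.toList p.toList).mpr
      ((PySem.Chars.find_ne_neg_one_iff content.toList p.toList).mp hf)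
  have hspec := (PySem.Chars.find_spec h0).1
  have hle := PySem.Chars.find_le_length content.toList p.toList
  rcases lt_or_eq_of_le hle with h | h
  · exact h
  · exfalso
    have hdrop : content.toList.drop (PySem.Chars.find content.toList p.toList).toNat = [] := by
      apply List.drop_eq_nil_of_le
      omega
    rw [hdrop] at hspec
    exact pvPhrasesL_ne_nil p.toList (List.mem_map.mpr ⟨p, hp, rfl⟩) (List.prefix_nil.mp hspec)

-- occurrence of a phrase (as chars) ↔ its Str.find is not -1
theorem pvOcc_iff (content : String) (p : String) :
    p.toList <:+: content.toList ↔ PySem.Str.find content p ≠ -1 := by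
  rw [PySem.Str.find_eq]
  exact (PySem.Chars.find_ne_neg_one_iff content.toList p.toList).symm

-- ===== VERDICT (by name: the statement is the Claim_ definition above) =====
theorem clean_linkedin_content_spec : Claim_equal_clean_linkedin_content := by
  intro content _
  unfold Spec_clean_linkedin_content
  have hlen : PySem.Str.len content = (content.toList.length : Int) := by
    simp [PySem.Str.len_eq]
  rcases hF : pvCutoffPhrases.foldl (pvAStep content) (PySem.Str.len content, none) with ⟨e1, f1⟩
  have hfst : e1 = pvEFold content pvCutoffPhrases (PySem.Str.len content) := by
    have h := pvFold_fst content pvCutoffPhrases (PySem.Str.len content) none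
    rw [hF] at h; exact h
  have hsnd : f1 = none ↔ pvEFold content pvCutoffPhrases (PySem.Str.len content) = PySem.Str.len content := by
    have h := pvFold_snd content pvCutoffPhrases (PySem.Str.len content) none
    rw [hF] at h; simpa using h
  simp only [clean_linkedin_content, clean_linkedin_content_alt, hF]
  by_cases hocc : ∀ p ∈ pvCutoffPhrases, PySem.Str.find content p = -1
  -- no phrase occurs: both sides strip the whole content
  · have hE : pvEFold content pvCutoffPhrases (PySem.Str.len content) = PySem.Str.len content := by
      rcases pvEFold_cases content pvCutoffPhrases (PySem.Str.len content) with h | ⟨p, hp, _, hne⟩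
      · exact h
      · exact absurd (hocc p hp) hne
    have hf1 : f1 = none := hsnd.mpr hE
    have hgo : pvCutGo content.toList 0 = none := by
      rw [pvCutGo_none]
      intro p hp hinf
      rcases List.mem_map.mp hp with ⟨q, hq, rfl⟩
      exact ((pvOcc_iff content q).mp hinf) (hocc q hq)
    rw [hf1, hgo]
  -- some phrase occurs
  · push_neg at hocc
    obtain ⟨p0, hp0, hf0⟩ := hocc
    have hEne : pvEFold content pvCutoffPhrases (PySem.Str.len content) ≠ PySem.Str.len content := by
      intro h
      have hmin0 := pvEFold_min content pvCutoffPhrases (PySem.Str.len content) p0 hp0 hf0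
      have hlt := pvFind_lt_len content p0 hp0 hf0
      rw [h, hlen] at hmin0
      omega
    have hf1 : f1 ≠ none := fun h => hEne (hsnd.mp h)
    rcases pvEFold_cases content pvCutoffPhrases (PySem.Str.len content) with h | ⟨q, hq, hEq, hqne⟩
    · exact absurd h hEne
    have hE0 : 0 ≤ pvEFold content pvCutoffPhrases (PySem.Str.len content) := by
      rw [hEq, PySem.Str.find_eq]
      exact (PySem.Chars.find_nonneg_iff content.toList q.toList).mpr
        ((PySem.Chars.find_ne_neg_one_iff content.toList q.toList).mp
          (by rw [PySem.Str.find_eq] at hqne; exact hqne))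
    -- B's scan succeeds
    have hgo : pvCutGo content.toList 0 ≠ none := by
      intro h
      exact ((pvCutGo_none content.toList 0).mp h) q.toList
        (List.mem_map.mpr ⟨q, hq, rfl⟩) ((pvOcc_iff content q).mpr hqne)
    obtain ⟨r, hr⟩ := Option.ne_none_iff_exists'.mp hgo
    obtain ⟨-, ⟨pw, hpw, hpre⟩, hmin⟩ := pvCutGo_some content.toList 0 r hr
    simp only [Nat.sub_zero] at hpre hmin
    -- r is exactly the Int result of A's fold, as a Nat
    have hrE : r = (pvEFold content pvCutoffPhrases (PySem.Str.len content)).toNat := by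
      have hqfind : 0 ≤ PySem.Chars.find content.toList q.toList := by
        rw [hEq, PySem.Str.find_eq] at hE0
        exact hE0
      have hqspec := PySem.Chars.find_spec hqfind
      have hEq' : (pvEFold content pvCutoffPhrases (PySem.Str.len content)).toNat
          = (PySem.Chars.find content.toList q.toList).toNat := by
        rw [hEq, PySem.Str.find_eq]
      have hle1 : r ≤ (pvEFold content pvCutoffPhrases (PySem.Str.len content)).toNat := by
        by_contra hcon
        push_neg at hcon
        exact hmin _ hcon q.toList (List.mem_map.mpr ⟨q, hq, rfl⟩) (hEq' ▸ hqspec.1)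
      obtain ⟨pw', hpw', rfl⟩ := List.mem_map.mp hpw
      have hwocc : pw'.toList <:+: content.toList := by
        rcases hpre with ⟨u, hu⟩
        exact ⟨content.toList.take r, u, by rw [List.append_assoc, hu, List.take_append_drop]⟩
      have hwfind : PySem.Str.find content pw' ≠ -1 := (pvOcc_iff content pw').mp hwocc
      have hw0 : 0 ≤ PySem.Chars.find content.toList pw'.toList := by
        rw [PySem.Str.find_eq] at hwfind
        exact (PySem.Chars.find_nonneg_iff content.toList pw'.toList).mpr
          ((PySem.Chars.find_ne_neg_one_iff content.toList pw'.toList).mp hwfind)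
      have hwspec := PySem.Chars.find_spec hw0
      have hwle : (PySem.Chars.find content.toList pw'.toList).toNat ≤ r := by
        by_contra hcon
        push_neg at hcon
        exact hwspec.2 r hcon hpre
      have hEle : pvEFold content pvCutoffPhrases (PySem.Str.len content) ≤ PySem.Str.find content pw' :=
        pvEFold_min content _ _ pw' hpw' hwfind
      rw [PySem.Str.find_eq] at hEle
      omega
    -- both branches now produce equal strings
    rw [hr]
    cases hc1 : f1 with
    | none => exact absurd hc1 hf1
    | some ph =>
      show PySem.Str.strip (PySem.Str.slice content none (some e1))
          = PySem.Str.strip (String.ofList (content.toList.take r))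
      apply congrArg
      apply String.toList_inj.mp
      have hslice : (PySem.Str.slice content none (some e1)).toList
          = content.toList.take e1.toNat := by
        rw [PySem.Str.toList_slice, PySem.Chars.slice_eq_listSlice, PySem.List.slice_to]
        rw [hfst]; exact hE0
      rw [hslice, hfst, ← hrE]
      simp
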